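-- pv_equiv track=rewrite | github.com/soumyajitcodes/hackerrank | hackerrank/python/04_sets/no_idea.py | happiness_count
-- ===== SOURCE A (Python) =====
-- def happiness_count(num_list, set_a, set_b):
--     happiness = 0
--
--     for num in num_list:
--         if num in set_a:
--             happiness += 1
--         elif num in set_b:
--             happiness -= 1
--         else:
--             happiness += 0
--
--     return happiness
-- ===== SOURCE B (Python) =====
-- def happiness_count(num_list, set_a, set_b):
--     cnt = {}
--     for num in num_list:
--         cnt[num] = cnt.get(num, 0) + 1
--     sa = set(set_a)
--     sb = set(set_b)
--     total = 0
--     for x in sa: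
--         total += cnt.get(x, 0)
--     for x in sb:
--         if x not in sa:
--             total -= cnt.get(x, 0)
--     return total
-- ===== Notes on version B (the rewrite author's own statement) =====
-- stated objective: alternative
-- what changed: B builds a frequency dict of num_list once and iterates over the deduplicated sets (adding counts for set_a, subtracting for set_b minus set_a) instead of scanning num_list and testing membership per element; not measurably faster on the generated inputs, where the sets are small.
import Mathlib
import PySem

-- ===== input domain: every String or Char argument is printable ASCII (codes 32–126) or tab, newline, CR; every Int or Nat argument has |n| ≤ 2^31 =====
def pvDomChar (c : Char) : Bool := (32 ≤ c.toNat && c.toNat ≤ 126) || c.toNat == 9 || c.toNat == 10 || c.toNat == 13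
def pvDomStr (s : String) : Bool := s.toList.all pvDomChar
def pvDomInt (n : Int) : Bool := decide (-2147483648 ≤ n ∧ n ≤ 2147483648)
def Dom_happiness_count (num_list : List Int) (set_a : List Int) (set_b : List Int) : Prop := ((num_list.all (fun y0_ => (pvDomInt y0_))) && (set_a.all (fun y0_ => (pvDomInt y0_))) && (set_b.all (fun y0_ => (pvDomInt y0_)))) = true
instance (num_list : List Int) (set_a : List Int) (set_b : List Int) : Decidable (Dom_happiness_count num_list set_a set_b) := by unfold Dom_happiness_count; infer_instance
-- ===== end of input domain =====

-- B replaces A's per-element membership scan of num_list by a frequency dict built once plus a pass over the deduplicated sets (objective: alternative).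


-- ===== PORT A =====
def happiness_count (num_list : List Int) (set_a : List Int) (set_b : List Int) : Int :=
  num_list.foldl (fun happiness num =>
    if set_a.contains num then happiness + 1
    else if set_b.contains num then happiness - 1
    else happiness + 0) 0

-- ===== PORT B =====
def happiness_count_alt (num_list : List Int) (set_a : List Int) (set_b : List Int) : Int :=
  let cnt := num_list.foldl (fun d num => d.insert num (d.getD num 0 + 1)) PySem.Dict.empty
  let sa := PySem.Set.ofList set_a
  let sb := PySem.Set.ofList set_b
  let total : Int := 0
  let total := sa.foldl (fun total x => total + cnt.getD x 0) total
  let total := sb.foldl (fun total x =>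
    if PySem.Set.contains sa x then total else total - cnt.getD x 0) total
  total

-- ===== PRECONDITION & SPEC =====
def Spec_happiness_count (num_list : List Int) (set_a : List Int) (set_b : List Int) (out : Int) : Prop := out = happiness_count_alt num_list set_a set_b
instance (num_list : List Int) (set_a : List Int) (set_b : List Int) (out : Int) : Decidable (Spec_happiness_count num_list set_a set_b out) := by unfold Spec_happiness_count; infer_instance

-- ===== CLAIM (what is proved, stated in full; the proofs are below) =====
def Claim_equal_happiness_count : Prop := ∀ (num_list : List Int) (set_a : List Int) (set_b : List Int), Dom_happiness_count num_list set_a set_b → Spec_happiness_count num_list set_a set_b (happiness_count num_list set_a set_b)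

-- ===== LEMMAS AND PROOFS =====

-- A's loop counts hits of set_a minus hits of set_b not already in set_a.
lemma foldA (a b : List Int) : ∀ (l : List Int) (h : Int),
    l.foldl (fun happiness num =>
      if a.contains num then happiness + 1
      else if b.contains num then happiness - 1
      else happiness + 0) h
    = h + (l.countP (fun n => a.contains n) : Int)
        - (l.countP (fun n => !a.contains n && b.contains n) : Int) := by
  intro l
  induction l with
  | nil => intro h; simp
  | cons n t ih =>
    intro h
    simp only [List.foldl_cons, List.countP_cons, ih]
    by_cases ha : n ∈ a <;> by_cases hb : n ∈ b <;>
      simp [List.contains_eq_mem, ha, hb] <;> omega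

-- Splitting a countP over membership in (x :: s), x fresh.
lemma countP_cons_mem (l : List Int) (p : Int → Bool) (x : Int) (s : List Int) (hx : x ∉ s) :
    l.countP (fun n => p n && (x :: s).contains n)
      = (if p x then l.count x else 0) + l.countP (fun n => p n && s.contains n) := by
  induction l with
  | nil => simp
  | cons m t ih =>
    simp only [List.countP_cons, List.count_cons, ih]
    by_cases hm : m = x
    · subst hm
      by_cases hp : p m = true <;>
        simp [List.contains_eq_mem, hp, hx]; omega
    · by_cases hp : p m = true <;> by_cases hc : m ∈ s <;>
        simp [List.contains_eq_mem, hp, hc, hm]; omega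

-- B's first pass: summing counts over a duplicate-free s.
lemma foldSum (l : List Int) : ∀ (s : List Int) (t : Int), s.Nodup →
    s.foldl (fun t x => t + (l.count x : Int)) t
      = t + (l.countP (fun n => s.contains n) : Int) := by
  intro s
  induction s with
  | nil => intro t _; simp
  | cons x s ih =>
    intro t hnd
    rcases List.nodup_cons.mp hnd with ⟨hx, hs⟩
    have hsplit := countP_cons_mem l (fun _ => true) x s hx
    simp only [Bool.true_and, if_true] at hsplit
    simp only [List.foldl_cons, ih _ hs, hsplit]
    push_cast; ring

-- B's second pass: subtracting counts of the set_b elements outside set_a.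
lemma foldSub (l a : List Int) : ∀ (s : List Int) (t : Int), s.Nodup →
    s.foldl (fun t x => if a.contains x then t else t - (l.count x : Int)) t
      = t - (l.countP (fun n => !a.contains n && s.contains n) : Int) := by
  intro s
  induction s with
  | nil => intro t _; simp
  | cons x s ih =>
    intro t hnd
    rcases List.nodup_cons.mp hnd with ⟨hx, hs⟩
    have hsplit := countP_cons_mem l (fun n => !a.contains n) x s hx
    simp only [List.foldl_cons, ih _ hs, hsplit]
    by_cases ha : x ∈ a <;>
      simp [List.contains_eq_mem, ha]; omega

-- ===== VERDICT (by name: the statement is the Claim_ definition above) =====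
theorem happiness_count_spec : Claim_equal_happiness_count := by
  intro num_list set_a set_b _
  unfold Spec_happiness_count happiness_count happiness_count_alt
  rw [PySem.Dict.foldl_insert_getD_add_one_eq_counter]
  simp only [PySem.Dict.getD_counter, PySem.Set.contains_eq_listContains]
  have h2 : ∀ (t : Int), (PySem.Set.ofList set_b).foldl
      (fun total x => if List.contains (PySem.Set.ofList set_a) x then total
        else total - (num_list.count x : Int)) t
    = (PySem.Set.ofList set_b).foldl
      (fun total x => if List.contains set_a x then total
        else total - (num_list.count x : Int)) t := by
    intro t
    apply PySem.List.foldl_congr_mem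
    intro acc x _
    simp [List.contains_eq_mem, PySem.Set.mem_ofList]
  rw [foldA, foldSum num_list _ _ (PySem.Set.nodup_ofList _), h2,
      foldSub num_list set_a _ _ (PySem.Set.nodup_ofList _)]
  have e1 : num_list.countP (fun n => List.contains (PySem.Set.ofList set_a) n)
      = num_list.countP (fun n => List.contains set_a n) := by
    apply List.countP_congr; intro n _
    simp [List.contains_eq_mem, PySem.Set.mem_ofList]
  have e2 : num_list.countP (fun n => !List.contains set_a n && List.contains (PySem.Set.ofList set_b) n)
      = num_list.countP (fun n => !List.contains set_a n && List.contains set_b n) := by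
    apply List.countP_congr; intro n _
    simp [List.contains_eq_mem, PySem.Set.mem_ofList]
  rw [e1, e2]
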